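-- pv_equiv track=rewrite | github.com/ivi982010/SySdL-TPs | Lexer.py | a_re2
-- ===== SOURCE A (Python) =====
-- def a_re2 (tokens, acu):
--     s = 0
--     for c in acu:
--         if s == 0 and c == 'f':
--             s = 1
--         elif s == 1 and c == 'l':
--             s = 2
--         elif s == 2 and c == 'o':
--             s = 3
--         elif s == 3 and c == 'a':
--             s = 4
--         elif s == 4 and c == 't':
--             s = 5
--         else:
--             s = -1
--             break
--     if s == 5:
--         tokens.append(("<Reservada>", acu))
--     return (s == 5)
-- ===== SOURCE B (Python) =====
-- def a_re2(tokens, acu):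
--     if acu == "float":
--         tokens.append(("<Reservada>", acu))
--         return True
--     return False
-- ===== Notes on version B (the rewrite author's own statement) =====
-- stated objective: simpler
-- what changed: Replaced the five-state per-character state machine with a single closed-form string equality check acu == "float".
import Mathlib
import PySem

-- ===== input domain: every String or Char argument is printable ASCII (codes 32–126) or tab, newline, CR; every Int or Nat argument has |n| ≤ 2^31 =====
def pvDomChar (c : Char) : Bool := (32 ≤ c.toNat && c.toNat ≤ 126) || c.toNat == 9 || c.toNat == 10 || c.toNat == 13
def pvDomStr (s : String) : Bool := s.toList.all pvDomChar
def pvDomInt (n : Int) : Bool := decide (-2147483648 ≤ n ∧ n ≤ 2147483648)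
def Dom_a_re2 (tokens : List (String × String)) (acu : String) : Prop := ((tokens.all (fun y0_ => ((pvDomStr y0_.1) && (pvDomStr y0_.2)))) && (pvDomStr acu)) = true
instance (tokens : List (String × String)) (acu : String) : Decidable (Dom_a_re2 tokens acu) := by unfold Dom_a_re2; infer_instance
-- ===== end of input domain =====

-- B replaces A's five-state per-character state machine by the single equality check acu == "float";
-- both versions append ("<Reservada>", acu) to tokens exactly when they return true — the theorem here
-- is about the RETURN VALUE only (the mutation of tokens is identical in A and B).

-- ===== PORT A =====
-- the for-loop with its early break: state s, -1 means the loop broke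
def a_re2_loop : Int → List Char → Int
  | s, [] => s
  | s, c :: cs =>
    if s = 0 ∧ c = 'f' then a_re2_loop 1 cs
    else if s = 1 ∧ c = 'l' then a_re2_loop 2 cs
    else if s = 2 ∧ c = 'o' then a_re2_loop 3 cs
    else if s = 3 ∧ c = 'a' then a_re2_loop 4 cs
    else if s = 4 ∧ c = 't' then a_re2_loop 5 cs
    else (-1)   -- s = -1; break

def a_re2 (_tokens : List (String × String)) (acu : String) : Bool :=
  a_re2_loop 0 acu.toList = 5

-- ===== PORT B =====
def a_re2_alt (_tokens : List (String × String)) (acu : String) : Bool :=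
  acu == "float"

-- ===== PRECONDITION & SPEC =====
def Spec_a_re2 (tokens : List (String × String)) (acu : String) (out : Bool) : Prop := out = a_re2_alt tokens acu
instance (tokens : List (String × String)) (acu : String) (out : Bool) : Decidable (Spec_a_re2 tokens acu out) := by unfold Spec_a_re2; infer_instance

-- ===== CLAIM (what is proved, stated in full; the proofs are below) =====
def Claim_equal_a_re2 : Prop := ∀ (tokens : List (String × String)) (acu : String), Dom_a_re2 tokens acu → Spec_a_re2 tokens acu (a_re2 tokens acu)

-- ===== LEMMAS AND PROOFS =====
lemma loop5 (l : List Char) : a_re2_loop 5 l = 5 ↔ l = [] := by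
  cases l with
  | nil => simp [a_re2_loop]
  | cons c cs => simp [a_re2_loop]

lemma loop4 (l : List Char) : a_re2_loop 4 l = 5 ↔ l = ['t'] := by
  cases l with
  | nil => simp [a_re2_loop]
  | cons c cs =>
    by_cases h : c = 't'
    · subst h; simp [a_re2_loop, loop5]
    · simp [a_re2_loop, h]

lemma loop3 (l : List Char) : a_re2_loop 3 l = 5 ↔ l = ['a', 't'] := by
  cases l with
  | nil => simp [a_re2_loop]
  | cons c cs =>
    by_cases h : c = 'a'
    · subst h; simp [a_re2_loop, loop4]
    · simp [a_re2_loop, h]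

lemma loop2 (l : List Char) : a_re2_loop 2 l = 5 ↔ l = ['o', 'a', 't'] := by
  cases l with
  | nil => simp [a_re2_loop]
  | cons c cs =>
    by_cases h : c = 'o'
    · subst h; simp [a_re2_loop, loop3]
    · simp [a_re2_loop, h]

lemma loop1 (l : List Char) : a_re2_loop 1 l = 5 ↔ l = ['l', 'o', 'a', 't'] := by
  cases l with
  | nil => simp [a_re2_loop]
  | cons c cs =>
    by_cases h : c = 'l'
    · subst h; simp [a_re2_loop, loop2]
    · simp [a_re2_loop, h]

lemma loop0 (l : List Char) : a_re2_loop 0 l = 5 ↔ l = ['f', 'l', 'o', 'a', 't'] := by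
  cases l with
  | nil => simp [a_re2_loop]
  | cons c cs =>
    by_cases h : c = 'f'
    · subst h; simp [a_re2_loop, loop1]
    · simp [a_re2_loop, h]

-- ===== VERDICT (by name: the statement is the Claim_ definition above) =====
theorem a_re2_spec : Claim_equal_a_re2 := by
  intro tokens acu _
  unfold Spec_a_re2 a_re2 a_re2_alt
  rw [show (acu == "float") = decide (acu = "float") from rfl]
  simp only [decide_eq_decide]
  rw [loop0, ← String.toList_inj]
  simp
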